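-- pv_equiv track=rewrite | github.com/avp55/advent-of-code-2024 | day15/puzzle.py | dfs_side
-- ===== SOURCE A (Python) =====
-- def dfs_side(x, y, input, dx, dy, collect):
--     nx, ny = x+dx, y+dy
--     # no bound checking as we will run into a wall first
--     if input[nx][ny] == '#':
--         return False
--     if input[nx][ny] == '.':
--         return True
--     collect.add((nx, ny))
--
--     return dfs_side(nx, ny, input, dx, dy, collect)
-- ===== SOURCE B (Python) =====
-- def dfs_side(x, y, input, dx, dy, collect):
--     # Declarative rewrite: enumerate candidate step counts k = 1..limit, lazily
--     # pair each with its cell, pick the FIRST terminal cell ('#' or '.') with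
--     # next(); then bulk-add the box cells passed.  (Mutates collect like A.)
--     limit = 2 * (len(input) + max((len(r) for r in input), default=0)) + 2
--     cells = ((k, input[x + k * dx][y + k * dy]) for k in range(1, limit + 1))
--     k, c = next((p for p in cells if p[1] in ('#', '.')))
--     collect.update((x + j * dx, y + j * dy) for j in range(1, k))
--     return c == '.'
-- ===== Notes on version B (the rewrite author's own statement) =====
-- stated objective: alternative
-- what changed: Replaces the tail recursion that threads a moving position and mutates collect step by step with a declarative pipeline: a lazy enumeration of (step count, cell) pairs, a next()-search for the first terminal cell, then one bulk update of collect.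
import Mathlib
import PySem

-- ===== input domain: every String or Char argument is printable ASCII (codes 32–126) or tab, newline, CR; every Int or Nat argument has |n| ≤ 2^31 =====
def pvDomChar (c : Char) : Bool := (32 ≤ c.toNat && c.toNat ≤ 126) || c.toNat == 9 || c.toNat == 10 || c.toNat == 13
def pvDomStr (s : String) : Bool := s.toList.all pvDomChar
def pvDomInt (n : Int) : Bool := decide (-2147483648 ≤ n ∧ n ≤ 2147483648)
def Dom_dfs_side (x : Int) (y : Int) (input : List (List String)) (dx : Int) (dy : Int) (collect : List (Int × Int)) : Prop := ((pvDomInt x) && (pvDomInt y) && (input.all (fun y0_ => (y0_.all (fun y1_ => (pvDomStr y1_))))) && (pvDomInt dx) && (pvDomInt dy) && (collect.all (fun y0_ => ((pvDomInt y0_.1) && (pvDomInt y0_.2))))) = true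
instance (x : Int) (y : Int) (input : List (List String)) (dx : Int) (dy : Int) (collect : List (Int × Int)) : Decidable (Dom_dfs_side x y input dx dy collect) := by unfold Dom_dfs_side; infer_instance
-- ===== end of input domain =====

-- B replaces A's tail recursion by a declarative pipeline (enumerate step counts,
-- find the first terminal cell, bulk-add the cells passed); the proved equivalence is
-- about the return value only — both Pythons also mutate `collect`, with the same
-- final contents wherever A returns.

-- shared helper: input[i][j] under Python indexing (none = IndexError)
def cellAt (input : List (List String)) (i j : Int) : Option String :=
  (PySem.List.pyGet? input i).bind (fun row => PySem.List.pyGet? row j)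

-- ===== PORT A =====
-- fuel bound: with a nonzero step, at most 2*len in-range positions exist on either
-- axis, so any terminating run of A makes fewer than this many recursive calls
def fuelOf (input : List (List String)) : Nat :=
  2 * (input.length + (input.map (·.length)).foldl Nat.max 0) + 2

-- literal port of A's tail recursion; fuel only makes it total (A diverges / raises
-- outside Pre_, where the port's `false` is not claimed to match)
def dfs_sideGo : Nat → Int → Int → List (List String) → Int → Int → PySem.Set (Int × Int) → Bool
  | 0, _, _, _, _, _, _ => false
  | fuel+1, x, y, input, dx, dy, collect =>
    let nx := x + dx
    let ny := y + dy
    match cellAt input nx ny with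
    | none => false   -- IndexError, excluded by Pre_
    | some c =>
      if c = "#" then false
      else if c = "." then true
      else dfs_sideGo fuel nx ny input dx dy (collect.add (nx, ny))

def dfs_side (x : Int) (y : Int) (input : List (List String)) (dx : Int) (dy : Int) (collect : List (Int × Int)) : Bool :=
  dfs_sideGo (fuelOf input) x y input dx dy (PySem.Set.ofList collect)

-- ===== PORT B =====
-- Source B's `limit`: same expression, 2*(len(input) + max row length) + 2
def limitOf (input : List (List String)) : Nat :=
  2 * (input.length + (input.map (·.length)).foldl Nat.max 0) + 2

-- Source B's generator stops yielding at the first k whose cell lookup raises (none) or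
-- whose cell is terminal; `next` over the filtered pairs is List.find? on that notion
def stopsAt (input : List (List String)) (x y dx dy : Int) (k : Nat) : Bool :=
  match cellAt input (x + (k : Int) * dx) (y + (k : Int) * dy) with
  | none => true                       -- IndexError while producing the pair, excluded by Pre_
  | some c => c = "#" ∨ c = "."

-- Source B's phase `collect.update(...)` only mutates `collect` (a side effect with no
-- Lean counterpart: the return type is Bool), so the port returns c == '.' directly
def dfs_side_alt (x : Int) (y : Int) (input : List (List String)) (dx : Int) (dy : Int) (collect : List (Int × Int)) : Bool :=
  match (List.range' 1 (limitOf input)).find? (stopsAt input x y dx dy) with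
  | none => false                      -- generator exhausted: next() raises StopIteration, excluded by Pre_
  | some k =>
    match cellAt input (x + (k : Int) * dx) (y + (k : Int) * dy) with
    | none => false                    -- IndexError, excluded by Pre_
    | some c => c = "."

-- ===== PRECONDITION & SPEC =====
-- the cell at (i,j) exists and is an ordinary (non-terminal) cell
def stepFree (input : List (List String)) (i j : Int) : Bool :=
  match cellAt input i j with
  | none => false
  | some s => if s = "#" ∨ s = "." then false else true

-- the cell at (i,j) exists and is '#' or '.'
def stepTerm (input : List (List String)) (i j : Int) : Bool :=
  match cellAt input i j with
  | none => false
  | some s => if s = "#" ∨ s = "." then true else false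

-- Pre_ = exactly the inputs where Python A returns: some cell on the ray is '#' or '.'
-- and every cell strictly before it is in range and non-terminal; otherwise A raises
-- IndexError (ray leaves the grid) or RecursionError (dx = dy = 0 on a non-terminal cell).
def Pre_dfs_side (x : Int) (y : Int) (input : List (List String)) (dx : Int) (dy : Int) (collect : List (Int × Int)) : Prop :=
  ∃ k < fuelOf input,
    (∀ j < k, stepFree input (x + ((j : Int) + 1) * dx) (y + ((j : Int) + 1) * dy) = true) ∧
    stepTerm input (x + ((k : Int) + 1) * dx) (y + ((k : Int) + 1) * dy) = true
instance (x : Int) (y : Int) (input : List (List String)) (dx : Int) (dy : Int) (collect : List (Int × Int)) : Decidable (Pre_dfs_side x y input dx dy collect) := by unfold Pre_dfs_side; infer_instance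

def pvWitness_dfs_side : Int × Int × List (List String) × Int × Int × (List (Int × Int)) :=
  (0, 0, [["@", "O", "#"]], 0, 1, [])

def Spec_dfs_side (x : Int) (y : Int) (input : List (List String)) (dx : Int) (dy : Int) (collect : List (Int × Int)) (out : Bool) : Prop := out = dfs_side_alt x y input dx dy collect
instance (x : Int) (y : Int) (input : List (List String)) (dx : Int) (dy : Int) (collect : List (Int × Int)) (out : Bool) : Decidable (Spec_dfs_side x y input dx dy collect out) := by unfold Spec_dfs_side; infer_instance

-- ===== CLAIM (what is proved, stated in full; the proofs are below) =====
def Claim_equal_dfs_side : Prop := ∀ (x : Int) (y : Int) (input : List (List String)) (dx : Int) (dy : Int) (collect : List (Int × Int)), Dom_dfs_side x y input dx dy collect → Pre_dfs_side x y input dx dy collect → Spec_dfs_side x y input dx dy collect (dfs_side x y input dx dy collect)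

-- ===== LEMMAS AND PROOFS =====
theorem pvWitness_ok :
    Dom_dfs_side (pvWitness_dfs_side.1) (pvWitness_dfs_side.2.1) (pvWitness_dfs_side.2.2.1) (pvWitness_dfs_side.2.2.2.1) (pvWitness_dfs_side.2.2.2.2.1) (pvWitness_dfs_side.2.2.2.2.2) ∧
    Pre_dfs_side (pvWitness_dfs_side.1) (pvWitness_dfs_side.2.1) (pvWitness_dfs_side.2.2.1) (pvWitness_dfs_side.2.2.2.1) (pvWitness_dfs_side.2.2.2.2.1) (pvWitness_dfs_side.2.2.2.2.2) := by
  constructor <;> decide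

-- the two phrasings agree step for step: A's walk from position (x+k*dx, y+k*dy) with
-- `fuel` calls left returns exactly what B's find?-search over the remaining step
-- counts range' (k+1) fuel yields
theorem go_eq_find (fuel : Nat) :
    ∀ (x y dx dy : Int) (input : List (List String)) (k : Nat) (s : PySem.Set (Int × Int)),
      dfs_sideGo fuel (x + (k : Int) * dx) (y + (k : Int) * dy) input dx dy s =
        (match (List.range' (k+1) fuel).find? (stopsAt input x y dx dy) with
         | none => false
         | some j =>
           match cellAt input (x + (j : Int) * dx) (y + (j : Int) * dy) with
           | none => false
           | some c => decide (c = ".")) := by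
  induction fuel with
  | zero => intro x y dx dy input k s; rfl
  | succ fuel ih =>
    intro x y dx dy input k s
    have hx : x + (k : Int) * dx + dx = x + ((k : Int) + 1) * dx := by ring
    have hy : y + (k : Int) * dy + dy = y + ((k : Int) + 1) * dy := by ring
    rw [List.range'_succ]
    simp only [dfs_sideGo, List.find?_cons, hx, hy]
    cases h : cellAt input (x + ((k : Int) + 1) * dx) (y + ((k : Int) + 1) * dy) with
    | none => simp [stopsAt, Nat.cast_add, Nat.cast_one, h]
    | some c =>
      by_cases h1 : c = "#"
      · simp [stopsAt, Nat.cast_add, Nat.cast_one, h, h1]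
      · by_cases h2 : c = "."
        · simp [stopsAt, Nat.cast_add, Nat.cast_one, h, h2]
        · have hstop : stopsAt input x y dx dy (k+1) = false := by
            simp [stopsAt, Nat.cast_add, Nat.cast_one, h, h1, h2]
          simp only [h1, h2, if_false, hstop]
          have := ih x y dx dy input (k+1) (s.add (x + ((k : Int) + 1) * dx, y + ((k : Int) + 1) * dy))
          simpa [Nat.cast_add, Nat.cast_one, h1, h2] using this

-- ===== VERDICT (by name: the statement is the Claim_ definition above) =====
theorem dfs_side_spec : Claim_equal_dfs_side := by
  intro x y input dx dy collect _ _
  unfold Spec_dfs_side dfs_side dfs_side_alt limitOf fuelOf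
  have := go_eq_find (fuelOf input) x y dx dy input 0 (PySem.Set.ofList collect)
  simpa [fuelOf] using this
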